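-- pv_equiv track=rewrite | github.com/sderet/dslr | describe.py | give_counts
-- ===== SOURCE A (Python) =====
-- def give_counts(names, file_content):
--     counts = {}
--     for name in names:
--         counts[name] = 0
--         for line in file_content:
--             if (name in line and line[name]):
--                 counts[name] += 1
--     return (counts)
-- ===== SOURCE B (Python) =====
-- def give_counts(names, file_content):
--     nameset = set(names)
--     counts = {name: 0 for name in names}
--     for line in file_content:
--         for key in line:
--             if key in nameset and line[key]:
--                 counts[key] += 1
--     return counts
-- ===== Notes on version B (the rewrite author's own statement) =====
-- stated objective: faster
-- what changed: Replaces the per-name rescan of all lines (and per-line key lookups) with one pass over the lines that visits each line's own keys once, checking membership against a prebuilt set and incrementing a pre-initialised counts dict.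
import Mathlib
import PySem

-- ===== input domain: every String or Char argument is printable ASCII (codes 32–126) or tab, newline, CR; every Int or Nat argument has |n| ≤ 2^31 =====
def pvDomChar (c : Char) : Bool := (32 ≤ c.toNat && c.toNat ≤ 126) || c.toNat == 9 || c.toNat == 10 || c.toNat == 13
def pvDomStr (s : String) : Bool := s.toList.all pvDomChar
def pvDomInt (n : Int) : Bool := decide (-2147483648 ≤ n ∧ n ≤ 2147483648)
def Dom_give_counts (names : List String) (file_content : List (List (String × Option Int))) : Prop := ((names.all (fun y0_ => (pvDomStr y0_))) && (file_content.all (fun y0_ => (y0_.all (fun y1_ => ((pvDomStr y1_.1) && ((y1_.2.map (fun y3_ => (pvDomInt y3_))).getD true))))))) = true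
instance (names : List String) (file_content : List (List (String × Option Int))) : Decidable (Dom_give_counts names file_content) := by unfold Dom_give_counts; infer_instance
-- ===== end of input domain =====

-- B replaces A's per-name rescan of all lines by a single pass over the lines'
-- own key/value pairs against a prebuilt name set and pre-zeroed counts dict.

-- Python truthiness of an Optional[int] cell: None and 0 are falsy.
def pvTruthy : Option Int → Bool
  | none => false
  | some n => n != 0

-- A's test 'name in line and line[name]' on one line (a dict)
def pvCondA (name : String) (line : List (String × Option Int)) : Bool :=
  (PySem.Dict.mk line).contains name && pvTruthy ((PySem.Dict.mk line).getD name none)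

-- ===== PORT A =====
def give_counts (names : List String) (file_content : List (List (String × Option Int))) : List (String × Int) :=
  (names.foldl (fun counts name =>
      file_content.foldl (fun counts line =>
          if pvCondA name line then counts.modify name 0 (· + 1) else counts)
        (counts.insert name 0))
    PySem.Dict.empty).items

-- ===== PORT B =====
-- 'line[key]' is ported as the pair's own value kv.2: exact because Pre_ restricts
-- lines to genuine dicts (no duplicate keys), where first-match lookup of kv.1 is kv.2.
def give_counts_alt (names : List String) (file_content : List (List (String × Option Int))) : List (String × Int) :=
  let nameset : PySem.Set String := PySem.Set.ofList names
  let counts0 : PySem.Dict String Int := names.foldl (fun d n => d.insert n 0) PySem.Dict.empty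
  (file_content.foldl (fun counts line =>
      line.foldl (fun counts kv =>
          if PySem.Set.contains nameset kv.1 && pvTruthy kv.2
          then counts.modify kv.1 0 (· + 1) else counts)
        counts)
    counts0).items

-- ===== PRECONDITION & SPEC =====
-- Pre_ excludes association lists that repeat a key inside one line: such a value is
-- not representable as a Python dict (A's lines ARE dicts), so no Python input is excluded.
def Pre_give_counts (names : List String) (file_content : List (List (String × Option Int))) : Prop :=
  ∀ line ∈ file_content, (line.map Prod.fst).Nodup
instance (names : List String) (file_content : List (List (String × Option Int))) : Decidable (Pre_give_counts names file_content) := by unfold Pre_give_counts; infer_instance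
def pvWitness_give_counts : List String × (List (List (String × Option Int))) :=
  (["a", "b"], [[("a", some 1), ("b", some 0)], [("a", none), ("c", some 2)]])
def Spec_give_counts (names : List String) (file_content : List (List (String × Option Int))) (out : List (String × Int)) : Prop := out = give_counts_alt names file_content
instance (names : List String) (file_content : List (List (String × Option Int))) (out : List (String × Int)) : Decidable (Spec_give_counts names file_content out) := by unfold Spec_give_counts; infer_instance

-- ===== CLAIM (what is proved, stated in full; the proofs are below) =====
def Claim_equal_give_counts : Prop := ∀ (names : List String) (file_content : List (List (String × Option Int))), Dom_give_counts names file_content → Pre_give_counts names file_content → Spec_give_counts names file_content (give_counts names file_content)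

-- ===== LEMMAS AND PROOFS =====

-- the dict whose items are the keys acc valued by g
def pvMkd (g : String → Int) (acc : List String) : PySem.Dict String Int :=
  PySem.Dict.mk (acc.map (fun a => (a, g a)))

theorem pvMkd_congr (g g' : String → Int) (acc : List String)
    (h : ∀ a ∈ acc, g a = g' a) : pvMkd g acc = pvMkd g' acc := by
  unfold pvMkd
  exact congrArg PySem.Dict.mk (List.map_congr_left (fun a ha => by rw [h a ha]))

theorem pvContains_mkd (g : String → Int) (acc : List String) (x : String) :
    (pvMkd g acc).contains x = acc.contains x := by
  induction acc with
  | nil => rfl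
  | cons a t ih =>
    simp only [pvMkd, PySem.Dict.contains, List.map_cons, List.any_cons, List.contains_cons] at ih ⊢
    rw [ih]; rw [show (a == x) = (x == a) from by by_cases hax : a = x <;> simp [hax, Ne.symm]]

theorem pvInsert_mkd (g : String → Int) (acc : List String) (x : String) (v : Int) :
    (pvMkd g acc).insert x v = pvMkd (fun a => if a = x then v else g a) (PySem.Set.add acc x) := by
  rw [PySem.Dict.insert, pvContains_mkd]
  unfold PySem.Set.add PySem.Set.contains
  by_cases h : acc.contains x
  · simp only [h, if_true, pvMkd, List.map_map]
    congr 1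
    apply List.map_congr_left
    intro a _
    by_cases hax : a = x <;> simp [hax, Function.comp]
  · simp only [h, if_false, Bool.false_eq_true, pvMkd, List.map_append, List.map_cons, List.map_nil]
    have h1 : List.map (fun a => (a, g a)) acc = List.map (fun a => (a, if a = x then v else g a)) acc := by
      apply List.map_congr_left
      intro a ha
      have hne : a ≠ x := fun e => h (by subst e; exact (List.contains_iff_mem).mpr ha)
      simp [hne]
    rw [h1]; simp

theorem pvGetD_mkd (g : String → Int) (acc : List String) (x : String) (hx : x ∈ acc) :
    (pvMkd g acc).getD x 0 = g x := by
  induction acc with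
  | nil => cases hx
  | cons a t ih =>
    by_cases hax : a = x
    · subst hax; simp [pvMkd, PySem.Dict.getD, PySem.Dict.get?]
    · have hxt : x ∈ t := by cases hx with | head => exact absurd rfl hax | tail _ h => exact h
      have := ih hxt
      simp only [pvMkd, PySem.Dict.getD, PySem.Dict.get?, List.map_cons, List.find?] at this ⊢
      simpa [show (a == x) = false by simpa using hax] using this

theorem pvModify_mkd (g : String → Int) (acc : List String) (x : String) (hx : x ∈ acc) :
    (pvMkd g acc).modify x 0 (· + 1) = pvMkd (fun a => if a = x then g a + 1 else g a) acc := by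
  rw [PySem.Dict.modify, pvGetD_mkd g acc x hx, pvInsert_mkd]
  have hadd : PySem.Set.add acc x = acc := by
    unfold PySem.Set.add PySem.Set.contains
    rw [(List.contains_iff_mem).mpr hx]; simp
  rw [hadd]
  unfold pvMkd
  congr 1
  apply List.map_congr_left
  intro a _
  by_cases hax : a = x <;> simp [hax]

theorem pvMem_add (acc : List String) (x : String) : x ∈ PySem.Set.add acc x := by
  unfold PySem.Set.add PySem.Set.contains
  by_cases h : acc.contains x
  · rw [if_pos h]; exact (List.contains_iff_mem).mp h
  · rw [if_neg h]; simp

-- A's inner loop from a keyed state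
theorem pvInnerA (fc : List (List (String × Option Int))) (n : String) :
    ∀ (g : String → Int) (acc : List String), n ∈ acc →
    fc.foldl (fun counts line => if pvCondA n line then counts.modify n 0 (· + 1) else counts) (pvMkd g acc)
      = pvMkd (fun a => if a = n then g a + (fc.countP (pvCondA n) : Int) else g a) acc := by
  induction fc with
  | nil =>
    intro g acc _
    simp only [List.foldl_nil, List.countP_nil, Nat.cast_zero, add_zero]
    exact (pvMkd_congr _ _ _ (fun a _ => by by_cases h : a = n <;> simp [h])).symm
  | cons line rest ih =>
    intro g acc hn
    simp only [List.foldl_cons, List.countP_cons]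
    by_cases hc : pvCondA n line
    · rw [if_pos hc, pvModify_mkd g acc n hn, ih _ acc hn]
      apply pvMkd_congr
      intro a _
      by_cases h : a = n <;> simp [h, hc] <;> push_cast <;> ring
    · rw [if_neg hc, ih g acc hn]
      apply pvMkd_congr
      intro a _
      by_cases h : a = n <;> simp [h, hc]

-- A's whole loop over names
theorem pvA_fold (fc : List (List (String × Option Int))) :
    ∀ (names acc : List String),
    names.foldl (fun counts name =>
        fc.foldl (fun counts line => if pvCondA name line then counts.modify name 0 (· + 1) else counts)
          (counts.insert name 0))
      (pvMkd (fun n => (fc.countP (pvCondA n) : Int)) acc)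
      = pvMkd (fun n => (fc.countP (pvCondA n) : Int)) (PySem.Set.update acc names) := by
  intro names
  induction names with
  | nil => intro acc; rfl
  | cons n rest ih =>
    intro acc
    simp only [List.foldl_cons]
    rw [pvInsert_mkd, pvInnerA fc n _ _ (pvMem_add acc n)]
    rw [pvMkd_congr _ (fun m => (fc.countP (pvCondA m) : Int)) _
      (fun a _ => by by_cases h : a = n <;> simp [h])]
    exact ih (PySem.Set.add acc n)

-- B's zero-initialisation
theorem pvB_init (names : List String) :
    ∀ (acc : List String),
    names.foldl (fun d n => d.insert n (0 : Int)) (pvMkd (fun _ => 0) acc)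
      = pvMkd (fun _ => 0) (PySem.Set.update acc names) := by
  induction names with
  | nil => intro acc; rfl
  | cons n rest ih =>
    intro acc
    simp only [List.foldl_cons]
    rw [pvInsert_mkd, pvMkd_congr _ (fun _ => (0 : Int)) _ (fun a _ => by by_cases h : a = n <;> simp [h])]
    exact ih (PySem.Set.add acc n)

-- B's counting fold over a list of pairs
theorem pvB_fold (q : String × Option Int → Bool) (acc : List String)
    (hq : ∀ kv, q kv = true → kv.1 ∈ acc) :
    ∀ (ps : List (String × Option Int)) (g : String → Int),
    ps.foldl (fun counts kv => if q kv then counts.modify kv.1 0 (· + 1) else counts) (pvMkd g acc)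
      = pvMkd (fun a => g a + (((ps.filter q).map Prod.fst).count a : Int)) acc := by
  intro ps
  induction ps with
  | nil => intro g; simp
  | cons kv rest ih =>
    intro g
    simp only [List.foldl_cons, List.filter_cons]
    by_cases hc : q kv
    · rw [if_pos hc, if_pos hc, pvModify_mkd g acc kv.1 (hq kv hc), ih]
      apply pvMkd_congr
      intro a _
      simp only [List.map_cons, List.count_cons]
      by_cases h : a = kv.1
      · simp [h]; push_cast; ring
      · simp [h, Ne.symm h]
    · rw [if_neg hc, if_neg hc, ih]

-- on a dict line (no duplicate keys) the pair count matches A's per-line test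
theorem pvLine_count (n : String) (line : List (String × Option Int))
    (hnd : (line.map Prod.fst).Nodup) :
    line.countP (fun kv => kv.1 == n && pvTruthy kv.2) = if pvCondA n line then 1 else 0 := by
  induction line with
  | nil => rfl
  | cons kv rest ih =>
    simp only [List.map_cons, List.nodup_cons] at hnd
    by_cases hk : kv.1 = n
    · have hz : rest.countP (fun kv => kv.1 == n && pvTruthy kv.2) = 0 := by
        apply List.countP_eq_zero.mpr
        intro p hp
        have : p.1 ≠ n := fun e => hnd.1 (by rw [← hk] at e; exact e ▸ List.mem_map_of_mem hp)
        simp [this]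
      rw [List.countP_cons, hz]
      have hcond : pvCondA n (kv :: rest) = pvTruthy kv.2 := by
        simp [pvCondA, PySem.Dict.contains, PySem.Dict.getD, PySem.Dict.get?, List.find?, hk]
      rw [hcond]
      by_cases ht : pvTruthy kv.2 <;> simp [hk, ht]
    · rw [List.countP_cons]
      have hcond : pvCondA n (kv :: rest) = pvCondA n rest := by
        simp [pvCondA, PySem.Dict.contains, PySem.Dict.getD, PySem.Dict.get?, List.find?,
          show (kv.1 == n) = false by simpa using hk]
      rw [hcond, ih hnd.2]
      simp [hk]

theorem pvSum_if (p : List (String × Option Int) → Bool) (fc : List (List (String × Option Int))) :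
    (fc.map (fun l => if p l then 1 else 0)).sum = fc.countP p := by
  induction fc with
  | nil => rfl
  | cons l rest ih =>
    rw [List.map_cons, List.sum_cons, List.countP_cons, ih]
    by_cases h : p l <;> simp [h] <;> omega

theorem pvCountP_flatten (p : String × Option Int → Bool) (fc : List (List (String × Option Int))) :
    fc.flatten.countP p = (fc.map (fun l => l.countP p)).sum := by
  induction fc with
  | nil => rfl
  | cons l rest ih => simp [List.countP_append, ih]

-- the key count bridge: B's per-key tally over all pairs equals A's per-name line count
theorem pvCount_bridge (names : List String) (fc : List (List (String × Option Int)))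
    (hpre : ∀ line ∈ fc, (line.map Prod.fst).Nodup) (n : String) (hn : n ∈ names) :
    (((fc.flatten.filter (fun kv => PySem.Set.contains (PySem.Set.ofList names) kv.1 && pvTruthy kv.2)).map Prod.fst).count n : Int)
      = (fc.countP (pvCondA n) : Int) := by
  have h1 : ((fc.flatten.filter (fun kv => PySem.Set.contains (PySem.Set.ofList names) kv.1 && pvTruthy kv.2)).map Prod.fst).count n
      = fc.flatten.countP (fun kv => kv.1 == n && pvTruthy kv.2) := by
    rw [List.count, List.countP_map, List.countP_filter]
    apply List.countP_congr
    intro kv _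
    by_cases hk : kv.1 = n
    · have hc : PySem.Set.contains (PySem.Set.ofList names) kv.1 = true := by
        unfold PySem.Set.contains
        rw [List.contains_iff_mem, hk]
        exact (PySem.Set.mem_ofList names n).mpr hn
      simp [Function.comp, hk, Bool.and_comm]
      exact fun _ => hn
    · simp [Function.comp, show (kv.1 == n) = false by simpa using hk]
  rw [h1, pvCountP_flatten]
  congr 1
  rw [← pvSum_if (pvCondA n) fc]
  congr 1
  apply List.map_congr_left
  intro line hline
  exact pvLine_count n line (hpre line hline)

-- ===== VERDICT (by name: the statement is the Claim_ definition above) =====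
theorem give_counts_spec : Claim_equal_give_counts := by
  intro names fc _ hpre
  unfold Spec_give_counts
  have hA : give_counts names fc
      = (pvMkd (fun n => (fc.countP (pvCondA n) : Int)) (PySem.Set.update [] names)).items := by
    unfold give_counts
    rw [show (PySem.Dict.empty : PySem.Dict String Int)
        = pvMkd (fun n => (fc.countP (pvCondA n) : Int)) [] from rfl]
    rw [pvA_fold fc names []]
  have hB : give_counts_alt names fc
      = (pvMkd (fun n => 0 + (((fc.flatten.filter (fun kv => PySem.Set.contains (PySem.Set.ofList names) kv.1 && pvTruthy kv.2)).map Prod.fst).count n : Int)) (PySem.Set.update [] names)).items := by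
    simp only [give_counts_alt]
    rw [show (PySem.Dict.empty : PySem.Dict String Int) = pvMkd (fun _ => 0) [] from rfl]
    rw [pvB_init names []]
    rw [← List.foldl_flatten]
    rw [pvB_fold _ (PySem.Set.update [] names)
      (fun kv hkv => by
        have := (Bool.and_eq_true _ _).mp hkv
        have hmem : kv.1 ∈ PySem.Set.ofList names := by
          have := this.1
          unfold PySem.Set.contains at this
          exact (List.contains_iff_mem).mp this
        simpa [PySem.Set.update_nil_left] using hmem)]
  rw [hA, hB]
  congr 1
  apply pvMkd_congr
  intro a ha
  have ha' : a ∈ names := by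
    rw [PySem.Set.update_nil_left] at ha
    exact (PySem.Set.mem_ofList names a).mp ha
  rw [pvCount_bridge names fc hpre a ha']
  ring
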